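-- pv_equiv track=rewrite | github.com/ziya-ai/ziya | app/utils/context_cache.py | _parse_context_by_files
-- ===== SOURCE A (Python) =====
-- from typing import Dict, List, Optional, Tuple, Any
--
-- def _parse_context_by_files(context: str) -> Dict[str, str]:
--     """
--     Parse context content and split by file sections.
--     Excludes template examples wrapped in <!-- TEMPLATE EXAMPLE --> comments.
--
--     Args:
--         context: Full context content
--
--     Returns:
--         Dict mapping file paths to their content sections
--     """
--     file_sections = {}
--     current_file = None
--     current_content = []
--     in_template_example = False
--
--     for line in context.split('\n'):
--         # Check for template example markers
--         if '<!-- TEMPLATE EXAMPLE START -->' in line: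
--             in_template_example = True
--             continue
--         elif '<!-- TEMPLATE EXAMPLE END -->' in line:
--             in_template_example = False
--             continue
--
--         # Skip lines within template examples
--         if in_template_example:
--             continue
--
--         if line.startswith('File: '):
--             # Save previous file section
--             if current_file and current_content:
--                 file_sections[current_file] = '\n'.join(current_content)
--
--             # Start new file section
--             current_file = line[6:]  # Remove "File: " prefix
--             current_content = [line]  # Include the File: line
--         elif current_file:
--             current_content.append(line)
--
--     # Save the last file section
--     if current_file and current_content:
--         file_sections[current_file] = '\n'.join(current_content)
--
--     return file_sections
-- ===== SOURCE B (Python) =====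
-- def _parse_context_by_files(context: str):
--     # Pass 1: drop template-example regions and their marker lines.
--     kept = []
--     in_template = False
--     for line in context.split('\n'):
--         if '<!-- TEMPLATE EXAMPLE START -->' in line:
--             in_template = True
--         elif '<!-- TEMPLATE EXAMPLE END -->' in line:
--             in_template = False
--         elif not in_template:
--             kept.append(line)
--
--     # Pass 2: segment the kept lines at 'File: ' headers by scanning ahead
--     # to the next header; each segment (header included) is one section.
--     sections = {}
--     i, n = 0, len(kept)
--     while i < n:
--         line = kept[i]
--         i += 1
--         if not line.startswith('File: '):
--             continue
--         start = i - 1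
--         while i < n and not kept[i].startswith('File: '):
--             i += 1
--         name = line[6:]
--         if name:
--             sections[name] = '\n'.join(kept[start:i])
--     return sections
-- ===== Notes on version B (the rewrite author's own statement) =====
-- stated objective: alternative
-- what changed: A's single stateful loop (template toggle + current-file/current-content accumulator with flush-on-header and final flush) is replaced by two passes: a filter pass that removes template-example regions, then a segmentation pass that scans ahead from each 'File: ' header to the next header and stores the slice directly, with no carried content accumulator.
import Mathlib
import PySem

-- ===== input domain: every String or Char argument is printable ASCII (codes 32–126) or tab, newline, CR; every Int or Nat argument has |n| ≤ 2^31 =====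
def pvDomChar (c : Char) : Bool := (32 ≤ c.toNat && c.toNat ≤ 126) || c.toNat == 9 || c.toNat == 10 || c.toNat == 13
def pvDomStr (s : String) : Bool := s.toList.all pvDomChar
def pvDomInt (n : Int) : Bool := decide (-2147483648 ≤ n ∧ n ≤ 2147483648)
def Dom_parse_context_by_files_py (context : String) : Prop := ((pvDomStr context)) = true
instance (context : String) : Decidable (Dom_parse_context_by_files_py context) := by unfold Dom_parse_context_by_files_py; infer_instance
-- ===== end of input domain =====

-- B replaces A's single stateful loop by filter-then-segment (scan ahead to the next header); same result, no speed claim.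

-- ===== PORT A =====
-- the three tests of A's loop body
def pvA_isStart (line : String) : Bool := PySem.Str.isIn "<!-- TEMPLATE EXAMPLE START -->" line
def pvA_isEnd (line : String) : Bool := PySem.Str.isIn "<!-- TEMPLATE EXAMPLE END -->" line
def pvA_isFile (line : String) : Bool := PySem.Str.startswith line "File: "

-- Python truthiness of current_file (None or the string after 'File: ') is encoded as ≠ "":
-- the initial None and an empty path are both falsy, and only strings are ever assigned.
def pvA_loop (lines : List String) (sections : PySem.Dict String String)
    (current_file : String) (current_content : List String) (in_template : Bool) :
    PySem.Dict String String :=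
  match lines with
  | [] =>
      if current_file ≠ "" ∧ current_content ≠ [] then
        sections.insert current_file (PySem.Str.join "\n" current_content)
      else sections
  | line :: rest =>
      if pvA_isStart line then
        pvA_loop rest sections current_file current_content true
      else if pvA_isEnd line then
        pvA_loop rest sections current_file current_content false
      else if in_template then
        pvA_loop rest sections current_file current_content in_template
      else if pvA_isFile line then
        let sections' :=
          if current_file ≠ "" ∧ current_content ≠ [] then
            sections.insert current_file (PySem.Str.join "\n" current_content)
          else sections
        pvA_loop rest sections' (PySem.Str.slice line (some 6) none) [line] in_template
      else if current_file ≠ "" then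
        pvA_loop rest sections current_file (current_content ++ [line]) in_template
      else
        pvA_loop rest sections current_file current_content in_template

def parse_context_by_files_py (context : String) : List (String × String) :=
  (pvA_loop ((PySem.Str.split? context "\n").getD []) PySem.Dict.empty "" [] false).items

-- ===== PORT B =====
def pvB_isStart (line : String) : Bool := PySem.Str.isIn "<!-- TEMPLATE EXAMPLE START -->" line
def pvB_isEnd (line : String) : Bool := PySem.Str.isIn "<!-- TEMPLATE EXAMPLE END -->" line
def pvB_isHeader (s : String) : Bool := PySem.Str.startswith s "File: "

-- pass 1: drop template-example regions and their marker lines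
def pvB_keep (lines : List String) (in_template : Bool) : List String :=
  match lines with
  | [] => []
  | line :: rest =>
      if pvB_isStart line then pvB_keep rest true
      else if pvB_isEnd line then pvB_keep rest false
      else if in_template then pvB_keep rest in_template
      else line :: pvB_keep rest in_template

-- pass 2: the inner 'while … not startswith' scan is the takeWhile/dropWhile split of the
-- tail; kept[start:i] is line :: body
def pvB_group (sections : PySem.Dict String String) (kept : List String) :
    PySem.Dict String String :=
  match kept with
  | [] => sections
  | line :: rest =>
      if pvB_isHeader line then
        let body := rest.takeWhile (fun x => ! pvB_isHeader x)
        let rest' := rest.dropWhile (fun x => ! pvB_isHeader x)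
        let name := PySem.Str.slice line (some 6) none
        pvB_group
          (if name ≠ "" then
            sections.insert name (PySem.Str.join "\n" (line :: body))
          else sections) rest'
      else pvB_group sections rest
  termination_by kept.length
  decreasing_by
    · simpa [Nat.lt_succ_iff] using List.length_dropWhile_le (fun x => ! pvB_isHeader x) rest
    · simp

def parse_context_by_files_py_alt (context : String) : List (String × String) :=
  (pvB_group PySem.Dict.empty (pvB_keep ((PySem.Str.split? context "\n").getD []) false)).items

-- ===== PRECONDITION & SPEC =====
def Spec_parse_context_by_files_py (context : String) (out : List (String × String)) : Prop := out = parse_context_by_files_py_alt context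
instance (context : String) (out : List (String × String)) : Decidable (Spec_parse_context_by_files_py context out) := by unfold Spec_parse_context_by_files_py; infer_instance

-- ===== CLAIM (what is proved, stated in full; the proofs are below) =====
def Claim_equal_parse_context_by_files_py : Prop := ∀ (context : String), Dom_parse_context_by_files_py context → Spec_parse_context_by_files_py context (parse_context_by_files_py context)

-- ===== LEMMAS AND PROOFS =====

lemma pvA_isStart_eq (s : String) : pvA_isStart s = pvB_isStart s := rfl
lemma pvA_isEnd_eq (s : String) : pvA_isEnd s = pvB_isEnd s := rfl
lemma pvA_isFile_eq (s : String) : pvA_isFile s = pvB_isHeader s := rfl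

lemma pvB_group_cons_not {line : String} {rest : List String}
    (d : PySem.Dict String String) (h : pvB_isHeader line = false) :
    pvB_group d (line :: rest) = pvB_group d rest := by
  rw [pvB_group]; simp [h]

lemma pvB_group_cons_header {line : String} {rest : List String}
    (d : PySem.Dict String String) (h : pvB_isHeader line = true) :
    pvB_group d (line :: rest) =
      pvB_group
        (if PySem.Str.slice line (some 6) none ≠ "" then
          d.insert (PySem.Str.slice line (some 6) none)
            (PySem.Str.join "\n" (line :: rest.takeWhile (fun x => ! pvB_isHeader x)))
        else d)
        (rest.dropWhile (fun x => ! pvB_isHeader x)) := by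
  rw [pvB_group]; simp [h]

-- A's second half (the File:-section machine), as it acts after template filtering
def pvLoop2 (lines : List String) (sections : PySem.Dict String String)
    (cf : String) (cc : List String) : PySem.Dict String String :=
  match lines with
  | [] =>
      if cf ≠ "" ∧ cc ≠ [] then sections.insert cf (PySem.Str.join "\n" cc) else sections
  | line :: rest =>
      if pvB_isHeader line then
        pvLoop2 rest
          (if cf ≠ "" ∧ cc ≠ [] then sections.insert cf (PySem.Str.join "\n" cc) else sections)
          (PySem.Str.slice line (some 6) none) [line]
      else if cf ≠ "" then pvLoop2 rest sections cf (cc ++ [line])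
      else pvLoop2 rest sections cf cc

-- A's loop = the filter pass followed by the section machine
lemma pvA_eq_loop2 (lines : List String) :
    ∀ (t : Bool) (d : PySem.Dict String String) (cf : String) (cc : List String),
    pvA_loop lines d cf cc t = pvLoop2 (pvB_keep lines t) d cf cc := by
  induction lines with
  | nil => intro t d cf cc; simp [pvA_loop, pvB_keep, pvLoop2]
  | cons line rest ih =>
    intro t d cf cc
    by_cases h1 : pvB_isStart line = true
    · simp [pvA_loop, pvB_keep, pvA_isStart_eq, h1, ih]
    · by_cases h2 : pvB_isEnd line = true
      · simp [pvA_loop, pvB_keep, pvA_isStart_eq, pvA_isEnd_eq, h1, h2, ih]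
      · cases t with
        | true => simp [pvA_loop, pvB_keep, pvA_isStart_eq, pvA_isEnd_eq, h1, h2, ih]
        | false =>
          by_cases h3 : pvB_isHeader line = true
          · simp [pvA_loop, pvB_keep, pvLoop2, pvA_isStart_eq, pvA_isEnd_eq, pvA_isFile_eq,
              h1, h2, h3, ih]
          · by_cases h4 : cf = "" <;>
              simp [pvA_loop, pvB_keep, pvLoop2, pvA_isStart_eq, pvA_isEnd_eq, pvA_isFile_eq,
                h1, h2, h3, h4, ih]

-- pvB_group ignores a leading run of non-header lines
lemma pvB_group_dropWhile (kept : List String) :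
    ∀ d, pvB_group d kept = pvB_group d (kept.dropWhile (fun x => ! pvB_isHeader x)) := by
  induction kept with
  | nil => intro d; simp
  | cons line rest ih =>
    intro d
    by_cases h : pvB_isHeader line = true
    · simp [List.dropWhile_cons, h]
    · rw [List.dropWhile_cons_of_pos (by simp [h]),
        pvB_group_cons_not d (by simpa using h), ih]

-- the section machine equals segment-ahead grouping, from any reachable state
lemma pvLoop2_eq_group (kept : List String) :
    ∀ (d : PySem.Dict String String) (cf : String) (cc : List String),
    (cf = "" ∨ cc ≠ []) →
    pvLoop2 kept d cf cc =
      if cf ≠ "" ∧ cc ≠ [] then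
        pvB_group
          (d.insert cf (PySem.Str.join "\n" (cc ++ kept.takeWhile (fun x => ! pvB_isHeader x))))
          (kept.dropWhile (fun x => ! pvB_isHeader x))
      else pvB_group d kept := by
  induction kept with
  | nil =>
    intro d cf cc _
    by_cases hc : cf ≠ "" ∧ cc ≠ [] <;> simp [pvLoop2, pvB_group, hc]
  | cons line rest ih =>
    intro d cf cc hinv
    by_cases h : pvB_isHeader line = true
    · -- header: takeWhile of line::rest is [], dropWhile keeps line::rest
      have hstep : pvLoop2 (line :: rest) d cf cc =
          pvLoop2 rest
            (if cf ≠ "" ∧ cc ≠ [] then d.insert cf (PySem.Str.join "\n" cc) else d)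
            (PySem.Str.slice line (some 6) none) [line] := by
        rw [pvLoop2]; simp [h]
      set d1 := if cf ≠ "" ∧ cc ≠ [] then d.insert cf (PySem.Str.join "\n" cc) else d with hd1
      set name := PySem.Str.slice line (some 6) none with hname
      rw [hstep, ih d1 name [line] (Or.inr (by simp)),
        List.takeWhile_cons_of_neg (by simp [h]), List.dropWhile_cons_of_neg (by simp [h])]
      by_cases hn : name = ""
      · -- empty path: the new state is falsy; both sides skip to the next header
        rw [if_neg (by simp [hn]), pvB_group_dropWhile rest d1]
        by_cases hc : cf ≠ "" ∧ cc ≠ []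
        · rw [if_pos hc, pvB_group_cons_header _ h, if_neg (by simp [← hname, hn])]
          simp [hd1, hc]
        · rw [if_neg hc, pvB_group_cons_header _ h, if_neg (by simp [← hname, hn])]
          simp [hd1, hc]
      · rw [if_pos ⟨hn, by simp⟩]
        by_cases hc : cf ≠ "" ∧ cc ≠ []
        · rw [if_pos hc, pvB_group_cons_header _ h, if_pos (by simp [← hname, hn])]
          simp [hd1, hc, ← hname]
        · rw [if_neg hc, pvB_group_cons_header _ h, if_pos (by simp [← hname, hn])]
          simp [hd1, hc, ← hname]
    · -- non-header line
      have htk := List.takeWhile_cons_of_pos (l := rest) (p := fun x => ! pvB_isHeader x)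
        (a := line) (by simp [h])
      have hdw := List.dropWhile_cons_of_pos (l := rest) (p := fun x => ! pvB_isHeader x)
        (a := line) (by simp [h])
      by_cases h4 : cf = ""
      · have hstep : pvLoop2 (line :: rest) d cf cc = pvLoop2 rest d cf cc := by
          rw [pvLoop2]; simp [h, h4]
        rw [hstep, ih d cf cc (Or.inl h4), if_neg (by simp [h4]), if_neg (by simp [h4]),
          pvB_group_cons_not d (by simpa using h)]
      · have hccne : cc ≠ [] := hinv.resolve_left h4
        have hstep : pvLoop2 (line :: rest) d cf cc = pvLoop2 rest d cf (cc ++ [line]) := by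
          rw [pvLoop2]; simp [h, h4]
        rw [hstep, ih d cf (cc ++ [line]) (Or.inr (by simp)),
          if_pos ⟨h4, by simp⟩, if_pos ⟨h4, hccne⟩, htk, hdw]
        simp

-- ===== VERDICT (by name: the statement is the Claim_ definition above) =====
theorem parse_context_by_files_py_spec : Claim_equal_parse_context_by_files_py := by
  intro context _
  unfold Spec_parse_context_by_files_py parse_context_by_files_py parse_context_by_files_py_alt
  rw [pvA_eq_loop2, pvLoop2_eq_group _ _ _ _ (Or.inl rfl)]
  simp
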